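-- pv_equiv track=rewrite | github.com/Alex-Merrill/Sudoku | sumsUI.py | get_all_combos
-- ===== SOURCE A (Python) =====
-- import itertools
--
-- def get_all_combos(s, d, f_type='none', f_nums=None):
--     # initialize f_nums if default
--     if f_nums is None:
--         f_nums = []
--     poss_nums = []
--
--     # add possible numbers to array
--     # handles excluding filter condition upfront
--     for i in range(1, 10):
--         if f_type == 'exc' and i not in f_nums:
--             poss_nums.append(i)
--         elif f_type != 'exc':
--             poss_nums.append(i)
--
--     # creates all combinations
--     # if d == -1 (any combination allowed), run through all iterations
--     # if d != -1 (only d length combinations allowed), only run when i == d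
--     mostly_final = set()
--     for i in range(1, 10):
--         if d != -1 and i != d:
--             continue
--
--         c = list(itertools.combinations(poss_nums, i))
--         all_combos = set(c)
--
--         for combo in all_combos:
--             if sum(combo) == s:
--                 mostly_final.add(combo)
--
--     # if inclusive filter active, make sure each combo has at least one of the included filter numbers
--     num_set = set(f_nums)
--     final = set()
--     if f_type == 'inc':
--         for fin in mostly_final:
--             fin_set = set(fin)
--             if len(fin_set) != len(fin_set-num_set):
--                 final.add(fin)
--     else:
--         final = mostly_final
--
--     return final
-- ===== SOURCE B (Python) =====
-- def _combos(rem, k, t):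
--     # all ascending k-element combinations of rem (itertools order) with sum exactly t,
--     # pruning any branch whose first element already exceeds the remaining target
--     if k == 0:
--         return [()] if t == 0 else []
--     if not rem:
--         return []
--     x, rest = rem[0], rem[1:]
--     if x > t:
--         return []
--     return [(x,) + c for c in _combos(rest, k - 1, t - x)] + _combos(rest, k, t)
--
--
-- def get_all_combos(s, d, f_type='none', f_nums=None):
--     nums = f_nums if f_nums is not None else []
--     allowed = [i for i in range(1, 10) if f_type != 'exc' or i not in nums]
--     lengths = range(1, 10) if d == -1 else [d]
--     result = set()
--     for k in lengths:
--         if 1 <= k <= 9: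
--             for c in _combos(allowed, k, s):
--                 if f_type != 'inc' or any(x in nums for x in c):
--                     result.add(c)
--     return result
-- ===== Notes on version B (the rewrite author's own statement) =====
-- stated objective: faster
-- what changed: Replaces itertools full enumeration of every combination followed by a sum test and an inclusive-filter post-pass over the result set with a recursive backtracking subset-sum generator over the allowed digits that prunes branches whose first digit exceeds the remaining target and applies the inclusive filter at emission time.
import Mathlib
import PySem

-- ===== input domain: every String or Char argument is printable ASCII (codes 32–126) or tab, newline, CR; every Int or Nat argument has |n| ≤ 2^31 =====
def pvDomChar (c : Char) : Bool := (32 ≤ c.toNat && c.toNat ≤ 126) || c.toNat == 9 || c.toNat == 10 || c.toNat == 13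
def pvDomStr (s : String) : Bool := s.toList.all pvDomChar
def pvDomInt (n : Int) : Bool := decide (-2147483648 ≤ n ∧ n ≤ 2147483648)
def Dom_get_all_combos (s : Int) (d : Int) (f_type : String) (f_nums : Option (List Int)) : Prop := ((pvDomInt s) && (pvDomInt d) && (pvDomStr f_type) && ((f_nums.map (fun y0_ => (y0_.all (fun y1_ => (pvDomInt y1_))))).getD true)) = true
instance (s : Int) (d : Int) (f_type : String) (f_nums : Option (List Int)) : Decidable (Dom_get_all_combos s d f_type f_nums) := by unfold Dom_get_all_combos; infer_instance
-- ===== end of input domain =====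

-- B replaces the itertools full enumeration + post-filtering with a recursive
-- backtracking subset-sum generator with pruning, filtering at emission time (objective: faster,
-- measured).
-- The Python function returns a set; per the type convention both ports return the
-- List of its distinct elements in first-insertion order.

-- ===== PORT A =====
def get_all_combos (s : Int) (d : Int) (f_type : String) (f_nums : Option (List Int)) : List (List Int) :=
  let f_nums := f_nums.getD []
  let poss_nums : List Int := (PySem.List.pyRange 1 10 1).foldl (fun acc i =>
    if (f_type == "exc" && !(f_nums.contains i)) = true then acc ++ [i]
    else if (!(f_type == "exc")) = true then acc ++ [i]
    else acc) []
  let mostly_final : PySem.Set (List Int) := (PySem.List.pyRange 1 10 1).foldl (fun mf i =>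
    if (d != -1 && i != d) = true then mf
    else
      -- here 1 ≤ i ≤ 9, so i.toNat is exact
      (PySem.Set.ofList (PySem.List.combinations poss_nums i.toNat)).foldl
        (fun mf combo => if (combo.sum == s) = true then PySem.Set.add mf combo else mf) mf)
    PySem.Set.empty
  let num_set : PySem.Set Int := PySem.Set.ofList f_nums
  if (f_type == "inc") = true then
    mostly_final.foldl (fun fin c =>
      if (PySem.Set.len (PySem.Set.ofList c) != PySem.Set.len (PySem.Set.diff (PySem.Set.ofList c) num_set)) = true
      then PySem.Set.add fin c else fin) PySem.Set.empty
  else mostly_final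

-- ===== PORT B =====
-- _combos(rem, k, t): ascending k-element combinations of rem summing exactly to t,
-- pruning any branch whose first element exceeds the remaining target
def pvCombosB : List Int → Nat → Int → List (List Int)
  | _, 0, t => if t == 0 then [[]] else []
  | [], _ + 1, _ => []
  | x :: rest, k + 1, t =>
      if x > t then []
      else (pvCombosB rest k (t - x)).map (fun c => x :: c) ++ pvCombosB rest (k + 1) t

def get_all_combos_alt (s : Int) (d : Int) (f_type : String) (f_nums : Option (List Int)) : List (List Int) :=
  let nums := f_nums.getD []
  let allowed : List Int := (PySem.List.pyRange 1 10 1).filter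
    (fun i => !(f_type == "exc") || !(nums.contains i))
  let lengths : List Int := if (d == -1) = true then PySem.List.pyRange 1 10 1 else [d]
  lengths.foldl (fun res k =>
    if (decide (1 ≤ k) && decide (k ≤ 9)) = true then
      (pvCombosB allowed k.toNat s).foldl (fun res c =>
        if (!(f_type == "inc") || c.any (fun x => nums.contains x)) = true
        then PySem.Set.add res c else res) res
    else res) PySem.Set.empty

-- ===== PRECONDITION & SPEC =====
def Spec_get_all_combos (s : Int) (d : Int) (f_type : String) (f_nums : Option (List Int)) (out : List (List Int)) : Prop := out = get_all_combos_alt s d f_type f_nums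
instance (s : Int) (d : Int) (f_type : String) (f_nums : Option (List Int)) (out : List (List Int)) : Decidable (Spec_get_all_combos s d f_type f_nums out) := by unfold Spec_get_all_combos; infer_instance

-- ===== CLAIM (what is proved, stated in full; the proofs are below) =====
def Claim_equal_get_all_combos : Prop := ∀ (s : Int) (d : Int) (f_type : String) (f_nums : Option (List Int)), Dom_get_all_combos s d f_type f_nums → Spec_get_all_combos s d f_type f_nums (get_all_combos s d f_type f_nums)

-- ===== LEMMAS AND PROOFS =====

theorem nodup_combinations {xs : List Int} (hx : xs.Nodup) :
    ∀ n : Nat, (PySem.List.combinations xs n).Nodup := by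
  induction xs with
  | nil =>
    intro n
    cases n <;> simp [PySem.List.combinations_zero, PySem.List.combinations_nil_succ]
  | cons x rest ih =>
    intro n
    have hrest : rest.Nodup := hx.of_cons
    have hxmem : x ∉ rest := by simp_all [List.nodup_cons]
    cases n with
    | zero => simp [PySem.List.combinations_zero]
    | succ n =>
      rw [PySem.List.combinations_cons_succ]
      refine List.Nodup.append ?_ (ih hrest (n + 1)) ?_
      · exact (ih hrest n).map (fun a b h => by injection h)
      · intro c h1 h2
        simp only [List.mem_map] at h1
        obtain ⟨c', _, rfl⟩ := h1
        have := PySem.List.sublist_of_mem_combinations h2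
        exact hxmem (this.subset (by simp))

-- the backtracking generator equals "enumerate, then keep the sum-s ones"
theorem pvCombosB_eq {xs : List Int} (h0 : ∀ y ∈ xs, 0 < y)
    (hs : xs.Pairwise (· ≤ ·)) : ∀ (n : Nat) (t : Int),
    pvCombosB xs n t = (PySem.List.combinations xs n).filter (fun c => c.sum == t) := by
  induction xs with
  | nil =>
    intro n t
    cases n with
    | zero =>
      by_cases h : t = 0 <;>
        simp [pvCombosB, PySem.List.combinations_zero, h] <;> omega
    | succ n => simp [pvCombosB, PySem.List.combinations_nil_succ]
  | cons x rest ih =>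
    intro n t
    have h0' : ∀ y ∈ rest, 0 < y := fun y hy => h0 y (by simp [hy])
    have hs' : rest.Pairwise (· ≤ ·) := hs.of_cons
    have hxle : ∀ y ∈ rest, x ≤ y := (List.pairwise_cons.mp hs).1
    cases n with
    | zero =>
      by_cases h : t = 0 <;>
        simp [pvCombosB, PySem.List.combinations_zero, h] <;> omega
    | succ n =>
      by_cases hxt : x > t
      · -- every (n+1)-combination sums to > t, so the filter is empty
        have hempty : ∀ c ∈ PySem.List.combinations (x :: rest) (n + 1), ¬ (c.sum == t) = true := by
          intro c hc
          obtain ⟨hsub, hl⟩ := (PySem.List.mem_combinations_iff _ _ _).mp hc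
          cases c with
          | nil => simp at hl
          | cons a c' =>
            have hmem : ∀ y ∈ a :: c', y ∈ x :: rest := fun y hy => hsub.subset hy
            have hax : x ≤ a := by
              rcases List.mem_cons.mp (hmem a (by simp)) with h | h
              · omega
              · exact hxle a h
            have hc'pos : 0 ≤ c'.sum := by
              apply List.sum_nonneg
              intro y hy
              have := List.mem_cons.mp (hmem y (by simp [hy]))
              rcases this with h | h
              · have := h0 x (by simp); omega
              · have := h0 y (by simp [h]); omega
            simp only [List.sum_cons, beq_iff_eq]
            omega
        simp only [pvCombosB, if_pos hxt]
        symm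
        rw [List.filter_eq_nil_iff]
        exact hempty
      · rw [PySem.List.combinations_cons_succ]
        simp only [pvCombosB, if_neg hxt, List.filter_append, ih h0' hs']
        congr 1
        rw [List.filter_map]
        congr 1
        refine List.filter_congr ?_
        intro c _
        rw [Bool.eq_iff_iff]
        simp only [Function.comp_apply, List.sum_cons, beq_iff_eq]
        omega

-- fold with a keep condition = fold over the kept elements
theorem foldl_keep {α β : Type} (f : β → α → β) (p : α → Bool) :
    ∀ (l : List α) (s0 : β),
    l.foldl (fun acc c => if p c = true then f acc c else acc) s0
      = (l.filter p).foldl f s0 := by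
  intro l
  induction l with
  | nil => intro s0; rfl
  | cons c l ih =>
    intro s0
    by_cases h : p c = true <;> simp [h, ih]

-- fold that appends every element = the accumulator followed by the list
theorem foldl_append_all {α : Type} :
    ∀ (l : List α) (acc : List α),
    l.foldl (fun acc i => acc ++ [i]) acc = acc ++ l := by
  intro l
  induction l with
  | nil => intro acc; simp
  | cons x l ih => intro acc; simp [ih]

-- fold with a skip condition = fold over the kept elements
theorem foldl_skip {α β : Type} (f : β → α → β) (p : α → Bool) :
    ∀ (l : List α) (s0 : β),
    l.foldl (fun acc i => if p i = true then acc else f acc i) s0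
      = (l.filter (fun i => !(p i))).foldl f s0 := by
  intro l
  induction l with
  | nil => intro s0; rfl
  | cons c l ih =>
    intro s0
    by_cases h : p c = true <;> simp [h, ih]

-- chaining per-length insert-folds = one insert-fold over the concatenation
theorem foldl_chain {α : Type} [BEq α] (g : Int → List α) :
    ∀ (ks : List Int) (s0 : PySem.Set α),
    ks.foldl (fun mf k => (g k).foldl PySem.Set.add mf) s0
      = ((ks.map g).flatten).foldl PySem.Set.add s0 := by
  intro ks
  induction ks with
  | nil => intro s0; rfl
  | cons k ks ih => intro s0; simp [ih, List.foldl_append]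

theorem chain_nodup (poss : List Int) (hn : poss.Nodup) (h0 : ∀ y ∈ poss, 0 < y)
    (hs : poss.Pairwise (· ≤ ·)) (s : Int) :
    ∀ ks : List Int, (ks.map Int.toNat).Nodup →
    ((ks.map (fun k => pvCombosB poss k.toNat s)).flatten).Nodup := by
  intro ks
  induction ks with
  | nil => intro _; simp
  | cons k ks ih =>
    intro hks
    simp only [List.map_cons, List.flatten_cons]
    have hks' : (ks.map Int.toNat).Nodup := (List.nodup_cons.mp hks).2
    have hkni : k.toNat ∉ ks.map Int.toNat := (List.nodup_cons.mp hks).1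
    refine List.Nodup.append ?_ (ih hks') ?_
    · rw [pvCombosB_eq h0 hs]
      exact List.Sublist.nodup List.filter_sublist (nodup_combinations hn _)
    · intro c h1 h2
      have hl1 : c.length = k.toNat := by
        rw [pvCombosB_eq h0 hs] at h1
        exact PySem.List.length_of_mem_combinations (List.mem_of_mem_filter h1)
      simp only [List.mem_flatten, List.mem_map] at h2
      obtain ⟨l, ⟨k', hk', rfl⟩, hcl⟩ := h2
      have hl2 : c.length = k'.toNat := by
        rw [pvCombosB_eq h0 hs] at hcl
        exact PySem.List.length_of_mem_combinations (List.mem_of_mem_filter hcl)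
      exact hkni (by rw [hl1] at hl2; rw [hl2]; exact List.mem_map_of_mem hk')

-- A's per-length pass (enumerate, dedup, keep the sum-s ones) = inserting B's combos
theorem innerA_eq (P : List Int) (hn : P.Nodup) (h0 : ∀ y ∈ P, 0 < y)
    (hs : P.Pairwise (· ≤ ·)) (s : Int) (i : Nat) (mf : PySem.Set (List Int)) :
    (PySem.Set.ofList (PySem.List.combinations P i)).foldl
      (fun mf combo => if (combo.sum == s) = true then PySem.Set.add mf combo else mf) mf
      = (pvCombosB P i s).foldl PySem.Set.add mf := by
  rw [PySem.Set.ofList_eq_self_of_nodup _ (nodup_combinations hn i),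
    foldl_keep, ← pvCombosB_eq h0 hs]

-- the two inclusive-filter tests agree
theorem cond_eq (c nums : List Int) :
    (PySem.Set.len (PySem.Set.ofList c)
      != PySem.Set.len (PySem.Set.diff (PySem.Set.ofList c) (PySem.Set.ofList nums)))
      = c.any (fun x => nums.contains x) := by
  rw [Bool.eq_iff_iff, bne_iff_ne]
  have hS : (PySem.Set.ofList c).Nodup := PySem.Set.nodup_ofList c
  have hD : (PySem.Set.diff (PySem.Set.ofList c) (PySem.Set.ofList nums)).Nodup :=
    PySem.Set.nodup_diff _ (PySem.Set.ofList nums) hS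
  have hDsub : ∀ x ∈ PySem.Set.diff (PySem.Set.ofList c) (PySem.Set.ofList nums),
      x ∈ PySem.Set.ofList c := by
    intro x hx
    exact ((PySem.Set.mem_diff _ _ _).mp hx).1
  constructor
  · intro h
    by_contra hno
    simp only [List.any_eq_true, List.contains_eq_mem, decide_eq_true_eq, not_exists,
      not_and] at hno
    apply h
    have hperm : (PySem.Set.diff (PySem.Set.ofList c) (PySem.Set.ofList nums)).Perm
        (PySem.Set.ofList c) := by
      rw [List.perm_ext_iff_of_nodup hD hS]
      intro a
      constructor
      · exact hDsub a
      · intro ha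
        rw [PySem.Set.mem_diff]
        refine ⟨ha, ?_⟩
        rw [PySem.Set.mem_ofList]
        exact hno a ((PySem.Set.mem_ofList _ _).mp ha)
    simp [PySem.Set.len, hperm.length_eq]
  · intro h
    simp only [List.any_eq_true, List.contains_eq_mem, decide_eq_true_eq] at h
    obtain ⟨x, hxc, hxn⟩ := h
    intro hlen
    have hxS : x ∈ PySem.Set.ofList c := (PySem.Set.mem_ofList _ _).mpr hxc
    have hxD : x ∉ PySem.Set.diff (PySem.Set.ofList c) (PySem.Set.ofList nums) := by
      rw [PySem.Set.mem_diff]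
      rintro ⟨-, hx2⟩
      exact hx2 ((PySem.Set.mem_ofList _ _).mpr hxn)
    have hsub : (PySem.Set.diff (PySem.Set.ofList c) (PySem.Set.ofList nums)).Subperm
        (PySem.Set.ofList c) := hD.subperm hDsub
    have hlen' : (PySem.Set.ofList c).length ≤
        (PySem.Set.diff (PySem.Set.ofList c) (PySem.Set.ofList nums)).length := by
      simp only [PySem.Set.len] at hlen
      omega
    exact hxD ((hsub.perm_of_length_le hlen').mem_iff.mpr hxS)

theorem get_all_combos_spec_aux : ∀ (s : Int) (d : Int) (f_type : String) (f_nums : Option (List Int)),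
    get_all_combos s d f_type f_nums = get_all_combos_alt s d f_type f_nums := by
  intro s d ft fn
  unfold get_all_combos get_all_combos_alt
  have hr : PySem.List.pyRange 1 10 1 = [1,2,3,4,5,6,7,8,9] := by decide
  simp only [hr]
  generalize fn.getD ([] : List Int) = nums
  -- the digits A admits = B's `allowed` list
  have hposs : List.foldl (fun acc i =>
      if (ft == "exc" && !nums.contains i) = true then acc ++ [i]
      else if (!(ft == "exc")) = true then acc ++ [i] else acc) [] [1,2,3,4,5,6,7,8,9]
      = List.filter (fun i => !(ft == "exc") || !(nums.contains i))
          ([1,2,3,4,5,6,7,8,9] : List Int) := by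
    cases hexc : (ft == "exc") with
    | false =>
      simp only [hexc, Bool.false_and, Bool.not_false, Bool.false_eq_true, if_false, if_true]
      rw [foldl_append_all]
      simp
    | true =>
      simp only [hexc, Bool.true_and, Bool.not_true, Bool.false_eq_true, if_false]
      rw [foldl_keep (fun acc i => acc ++ [i]) (fun i => !nums.contains i), foldl_append_all]
      simp
  simp only [hposs]
  set P : List Int := List.filter (fun i => !(ft == "exc") || !(nums.contains i))
    ([1,2,3,4,5,6,7,8,9] : List Int) with hPdef
  have hP1 : P.Nodup := List.Nodup.filter _ (by decide)
  have hP2 : ∀ y ∈ P, 0 < y := by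
    intro y hy
    have h' := (List.mem_filter.mp hy).1
    simp at h'
    rcases h' with rfl | rfl | rfl | rfl | rfl | rfl | rfl | rfl | rfl <;> norm_num
  have hP3 : P.Pairwise (· ≤ ·) := List.Pairwise.filter _ (by decide)
  -- A's enumeration loop = one insert-fold over the flattened backtracking results
  have hmid : List.foldl (fun mf i =>
      if (d != -1 && i != d) = true then mf
      else List.foldl (fun mf combo => if (combo.sum == s) = true then PySem.Set.add mf combo else mf)
        mf (PySem.Set.ofList (PySem.List.combinations P i.toNat))) PySem.Set.empty [1,2,3,4,5,6,7,8,9]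
      = (((([1,2,3,4,5,6,7,8,9] : List Int).filter (fun i => !(d != -1 && i != d))).map
          (fun k => pvCombosB P k.toNat s)).flatten).foldl PySem.Set.add [] := by
    rw [PySem.List.foldl_congr_mem _ _ (fun mf i =>
      if (d != -1 && i != d) = true then mf
      else (pvCombosB P i.toNat s).foldl PySem.Set.add mf) _ ?_]
    · rw [foldl_skip, foldl_chain]
      rfl
    · intro acc x _
      by_cases hc : (d != -1 && x != d) = true
      · simp only [hc, if_true]
      · simp only [hc, if_false, Bool.false_eq_true]
        exact innerA_eq P hP1 hP2 hP3 s x.toNat acc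
  simp only [hmid]
  -- B's guarded loop = one insert-fold over the filtered flattened results
  have hB := foldl_keep (fun res k =>
      List.foldl (fun res c =>
        if (!(ft == "inc") || c.any fun x => nums.contains x) = true
        then PySem.Set.add res c else res) res (pvCombosB P k.toNat s))
      (fun k => decide (1 ≤ k) && decide (k ≤ 9))
      (if (d == -1) = true then ([1,2,3,4,5,6,7,8,9] : List Int) else [d]) PySem.Set.empty
  rw [hB]
  have hC := PySem.List.foldl_congr_mem
      ((if (d == -1) = true then ([1,2,3,4,5,6,7,8,9] : List Int) else [d]).filter
        (fun k => decide (1 ≤ k) && decide (k ≤ 9)))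
      (fun res k =>
        List.foldl (fun res c =>
          if (!(ft == "inc") || c.any fun x => nums.contains x) = true
          then PySem.Set.add res c else res) res (pvCombosB P k.toNat s))
      (fun res k =>
        ((pvCombosB P k.toNat s).filter (fun c =>
          (!(ft == "inc") || c.any fun x => nums.contains x))).foldl PySem.Set.add res)
      PySem.Set.empty
      (fun acc k _ => foldl_keep _ _ _ acc)
  rw [hC]
  rw [foldl_chain]
  rw [show ((if (d == -1) = true then ([1,2,3,4,5,6,7,8,9] : List Int) else [d]).filter
        (fun k => decide (1 ≤ k) && decide (k ≤ 9))).map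
        (fun k => (pvCombosB P k.toNat s).filter (fun c =>
          (!(ft == "inc") || c.any fun x => nums.contains x)))
      = (((if (d == -1) = true then ([1,2,3,4,5,6,7,8,9] : List Int) else [d]).filter
        (fun k => decide (1 ≤ k) && decide (k ≤ 9))).map
        (fun k => pvCombosB P k.toNat s)).map
        (List.filter (fun c => (!(ft == "inc") || c.any fun x => nums.contains x)))
      from by rw [List.map_map]; rfl]
  rw [← List.filter_flatten]
  -- the two loops keep the same lengths
  have hK : (if (d == -1) = true then ([1,2,3,4,5,6,7,8,9] : List Int) else [d]).filter
        (fun k => decide (1 ≤ k) && decide (k ≤ 9))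
      = ([1,2,3,4,5,6,7,8,9] : List Int).filter (fun i => !(d != -1 && i != d)) := by
    by_cases hd : d = -1
    · subst hd; decide
    · rw [if_neg (by simp [hd])]
      by_cases hd9 : 1 ≤ d ∧ d ≤ 9
      · obtain ⟨h1, h2⟩ := hd9
        interval_cases d <;> decide
      · have hkb : ([d] : List Int).filter (fun k => decide (1 ≤ k) && decide (k ≤ 9)) = [] := by
          simp only [List.filter_cons, List.filter_nil]
          rw [if_neg]
          simp only [Bool.and_eq_true, decide_eq_true_eq, not_and]
          omega
        rw [hkb]
        symm
        rw [List.filter_eq_nil_iff]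
        intro i hi
        fin_cases hi <;> simp <;> omega
  rw [hK]
  set kA : List Int := ([1,2,3,4,5,6,7,8,9] : List Int).filter (fun i => !(d != -1 && i != d))
    with hkAdef
  set C : List (List Int) := ((kA.map (fun k => pvCombosB P k.toNat s)).flatten) with hCdef
  have hkn : (kA.map Int.toNat).Nodup := by
    have hsub : (kA.map Int.toNat).Sublist ((([1,2,3,4,5,6,7,8,9] : List Int)).map Int.toNat) :=
      List.Sublist.map _ (List.filter_sublist)
    exact List.Sublist.nodup hsub (by decide)
  have hCnodup : C.Nodup := chain_nodup P hP1 hP2 hP3 s kA hkn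
  have hfoldC : C.foldl PySem.Set.add [] = C := by
    rw [← PySem.Set.ofList_eq_foldl]
    exact PySem.Set.ofList_eq_self_of_nodup _ hCnodup
  cases hinc : (ft == "inc") with
  | false =>
    simp only [hinc, Bool.false_eq_true, if_false, Bool.not_false, Bool.true_or,
      List.filter_true]
    rfl
  | true =>
    simp only [hinc, if_true, Bool.not_true, Bool.false_or]
    rw [show (PySem.Set.empty : PySem.Set (List Int)) = ([] : List (List Int)) from rfl] at *
    rw [hfoldC, foldl_keep]
    rw [List.filter_congr (fun c _ => cond_eq c nums)]

-- ===== VERDICT (by name: the statement is the Claim_ definition above) =====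
theorem get_all_combos_spec : Claim_equal_get_all_combos := by
  intro s d f_type f_nums _
  exact get_all_combos_spec_aux s d f_type f_nums
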